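-- pv_equiv track=rewrite | github.com/OMT-Global/axiom | axiom/ast.py | parse_fn_type
-- ===== SOURCE A (Python) =====
-- from typing import List, Optional, Union
--
-- TypeName = str
--
-- def parse_fn_type(type_name: TypeName) -> tuple[List[TypeName], TypeName]:
--     """Parse 'fn(T1,...):R' -> (param_types, return_type).
--
--     Handles nested fn types by tracking parenthesis depth.
--     """
--     assert type_name.startswith("fn("), f"not a fn type: {type_name!r}"
--     rest = type_name[3:]  # after "fn("
--     # Find matching closing paren
--     depth = 1
--     i = 0
--     while i < len(rest) and depth > 0:
--         if rest[i] == "(":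
--             depth += 1
--         elif rest[i] == ")":
--             depth -= 1
--         i += 1
--     params_str = rest[: i - 1]
--     return_str = rest[i + 1 :]  # after "):"
--     if not params_str:
--         param_types: List[TypeName] = []
--     else:
--         # Split by comma, respecting nested parens
--         param_types = []
--         depth = 0
--         start = 0
--         for j, ch in enumerate(params_str):
--             if ch == "(":
--                 depth += 1
--             elif ch == ")":
--                 depth -= 1
--             elif ch == "," and depth == 0:
--                 param_types.append(params_str[start:j].strip())
--                 start = j + 1
--         param_types.append(params_str[start:].strip())
--     return param_types, return_str
-- ===== SOURCE B (Python) =====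
-- def parse_fn_type(type_name):
--     """Parse 'fn(T1,...):R' -> (param_types, return_type).
--
--     Single scan over the remainder: record top-level comma positions and the
--     index of the matching ')'; then reconstruct the pieces by slicing.
--     """
--     assert type_name.startswith("fn("), f"not a fn type: {type_name!r}"
--     rest = type_name[3:]
--     commas = []
--     end = len(rest) - 1  # if the parens never close, the scan runs off the end
--     depth = 1
--     for j, ch in enumerate(rest):
--         if ch == "(":
--             depth += 1
--         elif ch == ")":
--             depth -= 1
--             if depth == 0:
--                 end = j
--                 break
--         elif ch == "," and depth == 1:
--             commas.append(j)
--     return_str = rest[end + 2:]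
--     if end <= 0:
--         return [], return_str
--     pieces = []
--     prev = 0
--     for c in commas:
--         if c < end:
--             pieces.append(rest[prev:c].strip())
--             prev = c + 1
--     pieces.append(rest[prev:end].strip())
--     return pieces, return_str
-- ===== Notes on version B (the rewrite author's own statement) =====
-- stated objective: alternative
-- what changed: A finds the matching ')' with an index-based while loop and then re-scans the parameter region with a second depth-tracking enumerate/split pass; B makes one scan of the remainder that records the close index and the top-level comma positions, then reconstructs all pieces by slicing at those recorded positions.
import Mathlib
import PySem

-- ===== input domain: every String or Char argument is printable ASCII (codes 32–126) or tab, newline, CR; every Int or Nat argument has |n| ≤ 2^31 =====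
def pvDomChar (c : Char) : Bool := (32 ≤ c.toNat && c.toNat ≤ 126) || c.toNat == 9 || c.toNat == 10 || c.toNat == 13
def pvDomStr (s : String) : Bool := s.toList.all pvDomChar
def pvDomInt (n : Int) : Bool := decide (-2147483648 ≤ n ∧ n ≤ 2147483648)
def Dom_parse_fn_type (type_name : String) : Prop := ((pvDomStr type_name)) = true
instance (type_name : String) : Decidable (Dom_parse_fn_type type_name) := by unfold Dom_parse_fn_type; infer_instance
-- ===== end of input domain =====

-- B replaces A's two passes (find the matching paren, then re-scan the param region
-- splitting on top-level commas) by ONE scan that records the close index and the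
-- top-level comma positions, then reconstructs the pieces by slicing (objective:
-- alternative decomposition; return-value equivalence only — neither mutates anything).

-- ===== PORT A =====
-- while i < len(rest) and depth > 0: … (structural recursion on the remaining suffix, same state)
def pvAFind : List Char → Int → Nat → Nat
  | [], _, i => i
  | c :: cs, depth, i =>
    if 0 < depth then
      pvAFind cs (if c = '(' then depth + 1 else if c = ')' then depth - 1 else depth) (i + 1)
    else i

-- for j, ch in enumerate(params_str): … (state: j, depth, start, param_types)
def pvASplitGo (p : List Char) : List Char → Nat → Int → Nat → List String → List String × Int × Nat
  | [], _, depth, start, acc => (acc, depth, start)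
  | c :: cs, j, depth, start, acc =>
    if c = '(' then pvASplitGo p cs (j + 1) (depth + 1) start acc
    else if c = ')' then pvASplitGo p cs (j + 1) (depth - 1) start acc
    else if c = ',' ∧ depth = 0 then
      pvASplitGo p cs (j + 1) depth (j + 1)
        (acc ++ [String.ofList (PySem.Chars.strip (PySem.List.slice p (some (start : Int)) (some (j : Int))))])
    else pvASplitGo p cs (j + 1) depth start acc

-- body of A after rest = type_name[3:]
def pvACore (rest : List Char) : List String × String :=
  let i := pvAFind rest 1 0
  let params_str := PySem.List.slice rest none (some ((i : Int) - 1))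
  let return_str := PySem.List.slice rest (some ((i : Int) + 1)) none
  let param_types :=
    if params_str = [] then ([] : List String)
    else
      let st := pvASplitGo params_str params_str 0 0 0 []
      st.1 ++ [String.ofList (PySem.Chars.strip (PySem.List.slice params_str (some (st.2.2 : Int)) none))]
  (param_types, String.ofList return_str)

def parse_fn_type (type_name : String) : List String × String :=
  pvACore (PySem.List.slice type_name.toList (some 3) none)

-- ===== PORT B =====
-- single scan: top-level comma positions and the index of the matching ')' (break)
def pvBScan : List Char → Int → Nat → List Nat × Option Nat
  | [], _, _ => ([], none)
  | c :: cs, depth, j =>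
    if c = '(' then pvBScan cs (depth + 1) (j + 1)
    else if c = ')' then
      (if depth - 1 = 0 then ([], some j) else pvBScan cs (depth - 1) (j + 1))
    else if c = ',' ∧ depth = 1 then
      let r := pvBScan cs depth (j + 1); (j :: r.1, r.2)
    else pvBScan cs depth (j + 1)

-- body of B after rest = type_name[3:]
def pvBCore (rest : List Char) : List String × String :=
  let scan := pvBScan rest 1 0
  let endI : Int := match scan.2 with | some e => (e : Int) | none => (rest.length : Int) - 1
  let return_str := String.ofList (PySem.List.slice rest (some (endI + 2)) none)
  if endI ≤ 0 then ([], return_str)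
  else
    let st := scan.1.foldl (fun (st : List String × Nat) (c : Nat) =>
      if (c : Int) < endI then
        (st.1 ++ [String.ofList (PySem.Chars.strip (PySem.List.slice rest (some (st.2 : Int)) (some (c : Int))))], c + 1)
      else st) ([], 0)
    (st.1 ++ [String.ofList (PySem.Chars.strip (PySem.List.slice rest (some (st.2 : Int)) (some endI)))], return_str)

def parse_fn_type_alt (type_name : String) : List String × String :=
  pvBCore (PySem.List.slice type_name.toList (some 3) none)

-- ===== PRECONDITION & SPEC =====
-- Python A asserts type_name.startswith("fn(") and raises AssertionError otherwise;
-- Pre_ excludes exactly those raising inputs.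
def Pre_parse_fn_type (type_name : String) : Prop :=
  PySem.Str.startswith type_name "fn(" = true
instance (type_name : String) : Decidable (Pre_parse_fn_type type_name) := by
  unfold Pre_parse_fn_type; infer_instance

def pvWitness_parse_fn_type : String := "fn(int,fn(str):bool):str"

def Spec_parse_fn_type (type_name : String) (out : List String × String) : Prop := out = parse_fn_type_alt type_name
instance (type_name : String) (out : List String × String) : Decidable (Spec_parse_fn_type type_name out) := by unfold Spec_parse_fn_type; infer_instance

-- ===== CLAIM (what is proved, stated in full; the proofs are below) =====
def Claim_equal_parse_fn_type : Prop := ∀ (type_name : String), Dom_parse_fn_type type_name → Pre_parse_fn_type type_name → Spec_parse_fn_type type_name (parse_fn_type type_name)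

-- ===== LEMMAS AND PROOFS =====

-- reference single-scan with A's depth convention (δ = B's depth - 1), relative indices
def pvRef : List Char → Int → List Nat × Option Nat
  | [], _ => ([], none)
  | c :: cs, d =>
    if c = '(' then
      let r := pvRef cs (d + 1); (r.1.map (· + 1), r.2.map (· + 1))
    else if c = ')' then
      (if d = 0 then ([], some 0)
       else let r := pvRef cs (d - 1); (r.1.map (· + 1), r.2.map (· + 1)))
    else if c = ',' ∧ d = 0 then
      let r := pvRef cs d; (0 :: r.1.map (· + 1), r.2.map (· + 1))
    else
      let r := pvRef cs d; (r.1.map (· + 1), r.2.map (· + 1))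

def pvStep (d : Int) (c : Char) : Int := if c = '(' then d + 1 else if c = ')' then d - 1 else d

theorem pvMapShift (l : List Nat) (j : Nat) : (l.map (· + 1)).map (· + j) = l.map (· + (j + 1)) := by
  simp only [List.map_map]
  exact List.map_congr_left (fun x _ => by simp [Function.comp]; omega)

theorem pvOMapShift (o : Option Nat) (j : Nat) : (o.map (· + 1)).map (· + j) = o.map (· + (j + 1)) := by
  cases o <;> simp; omega

theorem pvBScan_eq_ref : ∀ (cs : List Char) (d : Int) (j : Nat),
    pvBScan cs (d + 1) j = ((pvRef cs d).1.map (· + j), (pvRef cs d).2.map (· + j)) := by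
  intro cs
  induction cs with
  | nil => intro d j; simp [pvBScan, pvRef]
  | cons c cs ih =>
    intro d j
    by_cases h1 : c = '('
    · simp only [pvBScan, pvRef, h1, reduceIte]
      rw [show d + 1 + 1 = (d + 1) + 1 from rfl, ih (d + 1) (j + 1), pvMapShift, pvOMapShift]
    · by_cases h2 : c = ')'
      · by_cases h3 : d = 0
        · simp [pvBScan, pvRef, h2, h3]
        · have hne : ¬ (d + 1 - 1 = 0) := by omega
          have e1 : ((')' : Char) = '(') = False := by decide
          simp only [pvBScan, pvRef, h2, e1, if_false, if_true, if_neg hne, if_neg h3]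
          rw [show d + 1 - 1 = (d - 1) + 1 by ring, ih (d - 1) (j + 1), pvMapShift, pvOMapShift]
      · by_cases h4 : c = ',' ∧ d = 0
        · have hb : (c = ',' ∧ d + 1 = 1) := ⟨h4.1, by omega⟩
          simp only [pvBScan, pvRef, if_neg h1, if_neg h2, if_pos hb, if_pos h4]
          rw [ih d (j + 1)]
          simp only [List.map_cons]
          rw [pvMapShift, pvOMapShift]
          norm_num
        · have hb : ¬ (c = ',' ∧ d + 1 = 1) := by
            rintro ⟨hc, hd⟩; exact h4 ⟨hc, by omega⟩
          simp only [pvBScan, pvRef, if_neg h1, if_neg h2, if_neg hb, if_neg h4]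
          rw [ih d (j + 1), pvMapShift, pvOMapShift]

theorem pvAFind_nonpos : ∀ (cs : List Char) (d : Int) (i : Nat), d ≤ 0 → pvAFind cs d i = i := by
  intro cs d i h
  cases cs with
  | nil => rfl
  | cons c cs => simp only [pvAFind, if_neg (by omega : ¬ (0 < d))]

theorem pvAFind_eq_ref : ∀ (cs : List Char) (d : Int) (i : Nat), 0 ≤ d →
    pvAFind cs (d + 1) i = i + (match (pvRef cs d).2 with | some e => e + 1 | none => cs.length) := by
  intro cs
  induction cs with
  | nil => intro d i _; simp [pvAFind, pvRef]
  | cons c cs ih =>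
    intro d i hd
    have hpos : (0 : Int) < d + 1 := by omega
    by_cases h1 : c = '('
    · simp only [pvAFind, pvRef, h1, reduceIte, if_pos hpos]
      rw [show d + 1 + 1 = (d + 1) + 1 from rfl, ih (d + 1) (i + 1) (by omega)]
      cases hh : (pvRef cs (d + 1)).2 <;> simp [List.length_cons] <;> ring
    · by_cases h2 : c = ')'
      · by_cases h3 : d = 0
        · have e1 : ((')' : Char) = '(') = False := by decide
          simp only [pvAFind, pvRef, h2, h3, e1, if_false, if_true]
          rw [show (0 : Int) + 1 - 1 = 0 from by ring, pvAFind_nonpos cs 0 (i + 1) le_rfl]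
          norm_num
        · have e1 : ((')' : Char) = '(') = False := by decide
          simp only [pvAFind, pvRef, h2, e1, if_false, if_true, if_pos hpos, if_neg h3]
          rw [show d + 1 - 1 = (d - 1) + 1 from by ring, ih (d - 1) (i + 1) (by omega)]
          cases hh : (pvRef cs (d - 1)).2 <;> simp [List.length_cons] <;> ring
      · by_cases h4 : c = ',' ∧ d = 0
        · simp only [pvAFind, pvRef, if_neg h1, if_neg h2, if_pos h4, if_pos hpos]
          rw [ih d (i + 1) hd]
          cases hh : (pvRef cs d).2 <;> simp [List.length_cons] <;> ring
        · simp only [pvAFind, pvRef, if_neg h1, if_neg h2, if_neg h4, if_pos hpos]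
          rw [ih d (i + 1) hd]
          cases hh : (pvRef cs d).2 <;> simp [List.length_cons] <;> ring

theorem pvMapAdd (l : List Nat) (a b : Nat) : (l.map (· + a)).map (· + b) = l.map (· + (a + b)) := by
  simp only [List.map_map]
  exact List.map_congr_left (fun x _ => by simp [Function.comp]; omega)

theorem pvOMapAdd (o : Option Nat) (a b : Nat) : (o.map (· + a)).map (· + b) = o.map (· + (a + b)) := by
  cases o <;> simp; omega

theorem pvRef_bound : ∀ (cs : List Char) (d : Int),
    (∀ k ∈ (pvRef cs d).1, k < cs.length) ∧ (∀ e, (pvRef cs d).2 = some e → e < cs.length) := by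
  intro cs
  induction cs with
  | nil => intro d; simp [pvRef]
  | cons c cs ih =>
    intro d
    simp only [pvRef]
    split_ifs with h1 h2 h3 h4 <;>
      refine ⟨?_, ?_⟩ <;>
      simp only [List.mem_map, List.mem_cons, List.length_cons, Option.map_eq_some_iff,
        List.not_mem_nil, false_implies, implies_true, Option.some.injEq] <;>
      first
        | (rintro k (rfl | ⟨x, hx, rfl⟩) <;> [omega; exact Nat.succ_lt_succ ((ih _).1 x hx)])
        | (rintro k ⟨x, hx, rfl⟩; exact Nat.succ_lt_succ ((ih _).1 x hx))
        | (rintro e ⟨x, hx, rfl⟩; exact Nat.succ_lt_succ ((ih _).2 x hx))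
        | (intro e he; omega)

theorem pvRef_append_some : ∀ (xs ys : List Char) (d : Int) (e : Nat),
    (pvRef xs d).2 = some e → pvRef (xs ++ ys) d = pvRef xs d := by
  intro xs
  induction xs with
  | nil => intro ys d e h; simp [pvRef] at h
  | cons c xs ih =>
    intro ys d e h
    simp only [pvRef, List.cons_append] at h ⊢
    split_ifs at h ⊢ with h1 h2 h3 h4
    · simp only [Option.map_eq_some_iff] at h
      obtain ⟨x, hx, _⟩ := h
      rw [ih ys (d + 1) x hx]
    · rfl
    · simp only [Option.map_eq_some_iff] at h
      obtain ⟨x, hx, _⟩ := h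
      rw [ih ys (d - 1) x hx]
    · simp only [Option.map_eq_some_iff] at h
      obtain ⟨x, hx, _⟩ := h
      rw [ih ys d x hx]
    · simp only [Option.map_eq_some_iff] at h
      obtain ⟨x, hx, _⟩ := h
      rw [ih ys d x hx]

theorem pvRef_append_none : ∀ (xs ys : List Char) (d : Int),
    (pvRef xs d).2 = none →
    pvRef (xs ++ ys) d =
      ((pvRef xs d).1 ++ (pvRef ys (xs.foldl pvStep d)).1.map (· + xs.length),
       (pvRef ys (xs.foldl pvStep d)).2.map (· + xs.length)) := by
  intro xs
  induction xs with
  | nil => intro ys d _; simp [pvRef]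
  | cons c xs ih =>
    intro ys d h
    simp only [pvRef, List.cons_append, List.foldl_cons] at h ⊢
    split_ifs at h ⊢ with h1 h2 h3 h4
    · simp only [Option.map_eq_none_iff] at h
      rw [ih ys (d + 1) h]
      have hs : pvStep d c = d + 1 := by simp [pvStep, h1]
      rw [hs]
      simp only [List.map_append, pvMapAdd, pvOMapAdd, List.length_cons]
    · simp only [Option.map_eq_none_iff] at h
      rw [ih ys (d - 1) h]
      have hs : pvStep d c = d - 1 := by simp [pvStep, h2]
      rw [hs]
      simp only [List.map_append, pvMapAdd, pvOMapAdd, List.length_cons]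
    · simp only [Option.map_eq_none_iff] at h
      rw [ih ys d h]
      have hs : pvStep d c = d := by simp [pvStep, h1, h2]
      rw [hs]
      simp only [List.map_append, pvMapAdd, pvOMapAdd, List.length_cons, List.cons_append]
    · simp only [Option.map_eq_none_iff] at h
      rw [ih ys d h]
      have hs : pvStep d c = d := by simp [pvStep, h1, h2]
      rw [hs]
      simp only [List.map_append, pvMapAdd, pvOMapAdd, List.length_cons]

-- common reconstruction: fold the cut positions, slicing p
def pvSegs (p : List Char) (start : Nat) (cl : List Nat) : List String × Nat :=
  cl.foldl (fun (st : List String × Nat) (c : Nat) =>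
    (st.1 ++ [String.ofList (PySem.Chars.strip (PySem.List.slice p (some (st.2 : Int)) (some (c : Int))))], c + 1))
    ([], start)

theorem pvSegs_acc (p : List Char) : ∀ (cl : List Nat) (as : List String) (start : Nat),
    cl.foldl (fun (st : List String × Nat) (c : Nat) =>
      (st.1 ++ [String.ofList (PySem.Chars.strip (PySem.List.slice p (some (st.2 : Int)) (some (c : Int))))], c + 1))
      (as, start) = (as ++ (pvSegs p start cl).1, (pvSegs p start cl).2) := by
  intro cl
  induction cl with
  | nil => intro as start; simp [pvSegs]
  | cons c cl ih =>
    intro as start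
    simp only [List.foldl_cons]
    rw [ih]
    conv_rhs => rw [pvSegs]
    simp only [List.foldl_cons, List.nil_append]
    rw [ih]
    simp [List.append_assoc]

theorem pvASplitGo_eq_ref (p : List Char) : ∀ (q : List Char) (d : Int) (j start : Nat) (acc : List String),
    (pvRef q d).2 = none →
    pvASplitGo p q j d start acc =
      (acc ++ (pvSegs p start ((pvRef q d).1.map (· + j))).1, q.foldl pvStep d,
       (pvSegs p start ((pvRef q d).1.map (· + j))).2) := by
  intro q
  induction q with
  | nil => intro d j start acc _; simp [pvASplitGo, pvRef, pvSegs]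
  | cons c q ih =>
    intro d j start acc h
    simp only [pvRef] at h
    simp only [pvASplitGo, pvRef, List.foldl_cons]
    by_cases h1 : c = '('
    · simp only [h1, reduceIte] at h ⊢
      simp only [Option.map_eq_none_iff] at h
      rw [ih (d + 1) (j + 1) start acc h, pvMapShift]
      have hs : pvStep d '(' = d + 1 := by simp [pvStep]
      rw [hs]
    · by_cases h2 : c = ')'
      · by_cases h3 : d = 0
        · exfalso
          have e1 : ((')' : Char) = '(') = False := by decide
          simp [h2, h3, e1] at h
        · have e1 : ((')' : Char) = '(') = False := by decide
          simp only [h2, h3, e1, if_false, if_true] at h ⊢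
          simp only [Option.map_eq_none_iff] at h
          rw [ih (d - 1) (j + 1) start acc h, pvMapShift]
          have hs : pvStep d ')' = d - 1 := by simp [pvStep]
          rw [hs]
      · by_cases h4 : c = ',' ∧ d = 0
        · simp only [if_neg h1, if_neg h2, if_pos h4] at h ⊢
          simp only [Option.map_eq_none_iff] at h
          rw [ih d (j + 1) (j + 1)
            (acc ++ [String.ofList (PySem.Chars.strip (PySem.List.slice p (some (start : Int)) (some (j : Int))))]) h]
          have hs : pvStep d c = d := by simp [pvStep, h1, h2]
          rw [hs]
          simp only [List.map_cons, Nat.zero_add]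
          rw [pvMapShift]
          conv_rhs => rw [pvSegs]
          simp only [List.foldl_cons, List.nil_append]
          rw [pvSegs_acc]
          simp [List.append_assoc]
        · simp only [if_neg h1, if_neg h2, if_neg h4] at h ⊢
          simp only [Option.map_eq_none_iff] at h
          rw [ih d (j + 1) start acc h, pvMapShift]
          have hs : pvStep d c = d := by simp [pvStep, h1, h2]
          rw [hs]

theorem pvSlice_take (r : List Char) (E prev c : Nat) (hc : c ≤ E) :
    PySem.List.slice (r.take E) (some (prev : Int)) (some (c : Int)) =
    PySem.List.slice r (some (prev : Int)) (some (c : Int)) := by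
  rw [PySem.List.slice_natCast, PySem.List.slice_natCast, List.drop_take]
  rw [List.take_take]
  congr 1
  omega

theorem pvSlice_take_last (r : List Char) (E prev : Nat) :
    PySem.List.slice (r.take E) (some (prev : Int)) none =
    PySem.List.slice r (some (prev : Int)) (some (E : Int)) := by
  rw [PySem.List.slice_from_natCast, PySem.List.slice_natCast, List.drop_take]

theorem pvRef_some_zero (q : List Char) (d : Int) (h : (pvRef q d).2 = some 0) : (pvRef q d).1 = [] := by
  cases q with
  | nil => simp [pvRef] at h
  | cons c cs =>
    simp only [pvRef] at h ⊢
    split_ifs at h ⊢ <;> simp_all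

theorem pvB_fold_eq (r : List Char) (E : Nat) (endI : Int) (hE : endI = (E : Int))
    (cl : List Nat) (h : ∀ c ∈ cl, c < E) :
    cl.foldl (fun (st : List String × Nat) (c : Nat) =>
      if (c : Int) < endI then
        (st.1 ++ [String.ofList (PySem.Chars.strip (PySem.List.slice r (some (st.2 : Int)) (some (c : Int))))], c + 1)
      else st) ([], 0) = pvSegs (r.take E) 0 cl := by
  subst hE
  rw [PySem.List.foldl_congr_mem (g := fun (st : List String × Nat) (c : Nat) =>
      (st.1 ++ [String.ofList (PySem.Chars.strip (PySem.List.slice (r.take E) (some (st.2 : Int)) (some (c : Int))))], c + 1))]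
  · rfl
  · intro acc c hc
    have hlt : (c : Int) < (E : Int) := by exact_mod_cast h c hc
    rw [if_pos hlt, pvSlice_take r E acc.2 c (le_of_lt (h c hc))]

theorem pvB_fold_skip (r : List Char) (endI : Int) :
    ∀ (cl : List Nat) (st : List String × Nat), (∀ c ∈ cl, ¬ ((c : Int) < endI)) →
    cl.foldl (fun (st : List String × Nat) (c : Nat) =>
      if (c : Int) < endI then
        (st.1 ++ [String.ofList (PySem.Chars.strip (PySem.List.slice r (some (st.2 : Int)) (some (c : Int))))], c + 1)
      else st) st = st := by
  intro cl
  induction cl with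
  | nil => intro st _; rfl
  | cons c cl ih =>
    intro st h
    simp only [List.foldl_cons, if_neg (h c (by simp))]
    exact ih st (fun x hx => h x (by simp [hx]))

theorem pvACore_eq_pvBCore (r : List Char) : pvACore r = pvBCore r := by
  have hB := pvBScan_eq_ref r 0 0
  have hA := pvAFind_eq_ref r 0 0 le_rfl
  simp only [zero_add] at hB hA
  unfold pvACore pvBCore
  rcases hco : (pvRef r 0).2 with _ | e
  · -- parens never close: i = len, end = len - 1
    simp only [hco] at hA
    have hmap0 : ∀ l : List Nat, l.map (· + 0) = l := fun l => by simp
    have homap0 : ∀ o : Option Nat, o.map (· + 0) = o := fun o => by cases o <;> simp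
    by_cases hnil : r = []
    · subst hnil
      simp [pvAFind, pvBScan, PySem.List.slice]
    · have hn1 : 1 ≤ r.length := by
        cases r with | nil => exact absurd rfl hnil | cons a l => simp
      have hcast : ((r.length : Nat) : Int) - 1 = ((r.length - 1 : Nat) : Int) := by omega
      have hparams : PySem.List.slice r none (some (((r.length : Nat) : Int) - 1)) = r.take (r.length - 1) := by
        rw [hcast, PySem.List.slice_to_natCast]
      have hsplit : r = r.take (r.length - 1) ++ r.drop (r.length - 1) := (List.take_append_drop _ r).symm
      have hPlen : (r.take (r.length - 1)).length = r.length - 1 := by rw [List.length_take]; omega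
      have hPnone : (pvRef (r.take (r.length - 1)) 0).2 = none := by
        rcases h2 : (pvRef (r.take (r.length - 1)) 0).2 with _ | e'
        · rfl
        · exfalso
          have hps := pvRef_append_some (r.take (r.length - 1)) (r.drop (r.length - 1)) 0 e' h2
          rw [← hsplit] at hps
          rw [hps, h2] at hco
          simp at hco
      have happ := pvRef_append_none (r.take (r.length - 1)) (r.drop (r.length - 1)) 0 hPnone
      rw [← hsplit] at happ
      have hcm : (pvRef r 0).1 = (pvRef (r.take (r.length - 1)) 0).1 ++
          (pvRef (r.drop (r.length - 1)) ((r.take (r.length - 1)).foldl pvStep 0)).1.map (· + (r.length - 1)) := by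
        have h5 := congrArg Prod.fst happ
        rw [hPlen] at h5
        exact h5
      have hcmlt : ∀ c ∈ (pvRef (r.take (r.length - 1)) 0).1, c < r.length - 1 :=
        fun c hc => hPlen ▸ (pvRef_bound (r.take (r.length - 1)) 0).1 c hc
      have hskip : ∀ c ∈ (pvRef (r.drop (r.length - 1)) ((r.take (r.length - 1)).foldl pvStep 0)).1.map (· + (r.length - 1)),
          ¬ ((c : Int) < ((r.length : Nat) : Int) - 1) := by
        intro c hc
        simp only [List.mem_map] at hc
        obtain ⟨x, _, rfl⟩ := hc
        omega
      simp only [hB, hA, hco, hmap0, homap0, hparams, hcm]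
      by_cases hone : r.length = 1
      · rw [hone]
        norm_num
      · have htne : r.take (r.length - 1) ≠ [] := by
          intro h7
          have := congrArg List.length h7
          rw [hPlen] at this
          simp at this
          omega
        rw [if_neg htne, if_neg (by omega : ¬ ((r.length : Int) - 1 ≤ 0))]
        rw [pvASplitGo_eq_ref _ _ 0 0 0 [] hPnone, hmap0]
        rw [List.foldl_append]
        rw [pvB_fold_eq r (r.length - 1) (((r.length : Nat) : Int) - 1) hcast _ hcmlt]
        rw [pvB_fold_skip r (((r.length : Nat) : Int) - 1) _ _ hskip]
        simp only [List.nil_append]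
        rw [hcast, pvSlice_take_last r (r.length - 1)]
        have hret : ((r.length : Nat) : Int) + 1 = ((r.length - 1 : Nat) : Int) + 2 := by omega
        rw [hret]
  · -- matching close at index e
    have hrne : r ≠ [] := by intro hnil; rw [hnil] at hco; simp [pvRef] at hco
    have he : e < r.length := (pvRef_bound r 0).2 e hco
    simp only [hco] at hA
    have hparams : PySem.List.slice r none (some (((e + 1 : Nat) : Int) - 1)) = r.take e := by
      have h1 : ((e + 1 : Nat) : Int) - 1 = ((e : Nat) : Int) := by push_cast; ring
      rw [h1, PySem.List.slice_to_natCast]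
    have hsplit : r = r.take e ++ r.drop e := (List.take_append_drop e r).symm
    have hPlen : (r.take e).length = e := by rw [List.length_take]; omega
    have hPnone : (pvRef (r.take e) 0).2 = none := by
      rcases h2 : (pvRef (r.take e) 0).2 with _ | e'
      · rfl
      · exfalso
        have hps := pvRef_append_some (r.take e) (r.drop e) 0 e' h2
        rw [← hsplit] at hps
        rw [hps, h2] at hco
        have hb := (pvRef_bound (r.take e) 0).2 e' h2
        rw [hPlen] at hb
        simp only [Option.some.injEq] at hco
        omega
    have happ := pvRef_append_none (r.take e) (r.drop e) 0 hPnone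
    rw [← hsplit] at happ
    have htail2 : ((pvRef (r.drop e) ((r.take e).foldl pvStep 0)).2).map (· + (r.take e).length) = some e := by
      have h5 := congrArg Prod.snd happ
      rw [hco] at h5
      exact h5.symm
    rw [hPlen] at htail2
    simp only [Option.map_eq_some_iff] at htail2
    obtain ⟨z, hz, hze⟩ := htail2
    have hz0 : z = 0 := by omega
    rw [hz0] at hz
    have htcm : (pvRef (r.drop e) ((r.take e).foldl pvStep 0)).1 = [] := pvRef_some_zero _ _ hz
    have hcm : (pvRef r 0).1 = (pvRef (r.take e) 0).1 := by
      rw [happ, htcm]; simp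
    have hcmlt : ∀ c ∈ (pvRef (r.take e) 0).1, c < e := fun c hc => hPlen ▸ (pvRef_bound (r.take e) 0).1 c hc
    have hmap0 : ∀ l : List Nat, l.map (· + 0) = l := fun l => by simp
    have homap0 : ∀ o : Option Nat, o.map (· + 0) = o := fun o => by cases o <;> simp
    simp only [hB, hA, hco, hcm, hmap0, homap0, hparams]
    by_cases he0 : e = 0
    · subst he0
      have hret : ((0 + 1 + 1 : Nat) : Int) - 1 - 1 = 0 := by norm_num
      simp
    · have ht0 : r.take e ≠ [] := by
        intro hnil
        have := congrArg List.length hnil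
        rw [hPlen] at this
        simp at this
        omega
      rw [if_neg ht0, if_neg (by omega : ¬ ((e : Int) ≤ 0))]
      rw [pvASplitGo_eq_ref (r.take e) (r.take e) 0 0 0 [] hPnone, hmap0]
      rw [pvB_fold_eq r e ((e : Nat) : Int) rfl (pvRef (r.take e) 0).1 hcmlt]
      simp only [List.nil_append]
      rw [pvSlice_take_last r e]
      have hret : ((e + 1 : Nat) : Int) + 1 = ((e : Nat) : Int) + 2 := by push_cast; ring
      rw [hret]

-- ===== VERDICT (by name: the statement is the Claim_ definition above) =====
theorem parse_fn_type_spec : Claim_equal_parse_fn_type := by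
  intro type_name _ _
  unfold Spec_parse_fn_type parse_fn_type parse_fn_type_alt
  exact pvACore_eq_pvBCore _
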